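-- pv_equiv track=rewrite | github.com/rhiza-research/grafana-weaver | src/grafana_weaver/core/dashboard_extractor.py | _split_on_external
-- ===== SOURCE A (Python) =====
-- def _split_on_external(value: str) -> list[tuple[str, str]]:
--     """
--     Split a multi-line value into segments at EXTERNAL markers.
--
--     Args:
--         value: Multi-line string potentially containing EXTERNAL markers
--
--     Returns:
--         List of (external_line, content) tuples
--     """
--     lines = value.split("\n")
--     segments = []
--     current_external_line = None
--     current_content = []
--
--     for line in lines:
--         if "EXTERNAL" in line:
--             if current_external_line is not None:
--                 segments.append((current_external_line, "\n".join(current_content)))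
--
--             current_external_line = line
--             current_content = []
--         else:
--             if current_external_line is not None:
--                 current_content.append(line)
--
--     if current_external_line is not None:
--         segments.append((current_external_line, "\n".join(current_content)))
--
--     return segments
-- ===== SOURCE B (Python) =====
-- def _split_on_external(value: str) -> list[tuple[str, str]]:
--     lines = value.split("\n")
--     n = len(lines)
--     segments = []
--     i = 0
--     while i < n:
--         if "EXTERNAL" in lines[i]:
--             j = i + 1
--             while j < n and "EXTERNAL" not in lines[j]:
--                 j += 1
--             segments.append((lines[i], "\n".join(lines[i + 1:j])))
--             i = j
--         else:
--             i += 1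
--     return segments
-- ===== Notes on version B (the rewrite author's own statement) =====
-- stated objective: alternative
-- what changed: Replaced A's single-pass state machine carrying current_external_line/current_content accumulators with an index two-pointer scan: for each marker line, an inner scan finds the next marker and the content is taken as one slice join.
import Mathlib
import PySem

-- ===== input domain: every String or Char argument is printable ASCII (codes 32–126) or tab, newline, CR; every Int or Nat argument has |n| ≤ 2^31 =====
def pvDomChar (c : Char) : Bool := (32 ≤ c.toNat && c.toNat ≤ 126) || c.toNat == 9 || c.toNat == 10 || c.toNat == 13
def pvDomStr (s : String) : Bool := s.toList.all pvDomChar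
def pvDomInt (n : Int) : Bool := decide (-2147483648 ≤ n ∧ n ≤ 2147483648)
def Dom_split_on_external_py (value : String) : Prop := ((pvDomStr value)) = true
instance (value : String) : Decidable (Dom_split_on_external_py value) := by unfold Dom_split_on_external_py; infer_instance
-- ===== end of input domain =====

-- B replaces A's accumulator state machine by a two-pointer index scan with slice extraction (objective: alternative, same O(n) cost).

-- ===== PORT A =====
-- "EXTERNAL" in line
def pvMarker (line : String) : Bool := PySem.Str.isIn "EXTERNAL" line

-- one iteration of A's for-loop over (current_external_line, current_content, segments)
def pvStepA (st : Option String × List String × List (String × String)) (line : String) :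
    Option String × List String × List (String × String) :=
  if pvMarker line then
    match st.1 with
    | some cur => (some line, [], st.2.2 ++ [(cur, PySem.Str.join "\n" st.2.1)])
    | none => (some line, [], st.2.2)
  else
    match st.1 with
    | some _ => (st.1, st.2.1 ++ [line], st.2.2)
    | none => st

def split_on_external_py (value : String) : List (String × String) :=
  let lines := (PySem.Str.split? value "\n").getD []
  let st := lines.foldl pvStepA (none, [], [])
  match st.1 with
  | some cur => st.2.2 ++ [(cur, PySem.Str.join "\n" st.2.1)]
  | none => st.2.2

-- ===== PORT B =====
-- inner while: j advances while j < n and lines[j] has no marker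
def pvScanB (lines : List String) (j : Nat) : Nat :=
  if h : j < lines.length then
    if pvMarker lines[j] then j else pvScanB lines (j + 1)
  else j
termination_by lines.length - j

theorem pvScanB_ge (lines : List String) (j : Nat) : j ≤ pvScanB lines j := by
  fun_induction pvScanB lines j with
  | case1 => omega
  | case2 _ _ _ ih => omega
  | case3 => omega

-- outer while over index i, appending one (marker, joined slice) per marker
def pvLoopB (lines : List String) (i : Nat) (segs : List (String × String)) :
    List (String × String) :=
  if h : i < lines.length then
    if pvMarker lines[i] then
      let j := pvScanB lines (i + 1)
      pvLoopB lines j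
        (segs ++ [(lines[i],
          PySem.Str.join "\n" (PySem.List.slice lines (some ((i : Int) + 1)) (some (j : Int))))])
    else pvLoopB lines (i + 1) segs
  else segs
termination_by lines.length - i
decreasing_by
  · have := pvScanB_ge lines (i + 1); omega
  · omega

def split_on_external_py_alt (value : String) : List (String × String) :=
  let lines := (PySem.Str.split? value "\n").getD []
  pvLoopB lines 0 []

-- ===== PRECONDITION & SPEC =====
def Spec_split_on_external_py (value : String) (out : List (String × String)) : Prop := out = split_on_external_py_alt value
instance (value : String) (out : List (String × String)) : Decidable (Spec_split_on_external_py value out) := by unfold Spec_split_on_external_py; infer_instance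

-- ===== CLAIM (what is proved, stated in full; the proofs are below) =====
def Claim_equal_split_on_external_py : Prop := ∀ (value : String), Dom_split_on_external_py value → Spec_split_on_external_py value (split_on_external_py value)

-- ===== LEMMAS AND PROOFS =====

-- common characterisation: segments of a list of lines
def pvSeg : List String → List (String × String)
  | [] => []
  | l :: ls =>
    if pvMarker l then
      (l, PySem.Str.join "\n" (ls.takeWhile (fun x => !pvMarker x))) ::
        pvSeg (ls.dropWhile (fun x => !pvMarker x))
    else pvSeg ls
termination_by ls => ls.length
decreasing_by
  · have := List.length_dropWhile_le (fun x => !pvMarker x) ls; simpa using Nat.lt_succ_of_le this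
  · simp

-- A's finalisation step
def pvFin (st : Option String × List String × List (String × String)) : List (String × String) :=
  match st.1 with
  | some cur => st.2.2 ++ [(cur, PySem.Str.join "\n" st.2.1)]
  | none => st.2.2

theorem foldA_some (lines : List String) :
    ∀ (m : String) (c : List String) (segs : List (String × String)),
      pvFin (lines.foldl pvStepA (some m, c, segs)) =
        segs ++ (m, PySem.Str.join "\n" (c ++ lines.takeWhile (fun x => !pvMarker x))) ::
          pvSeg (lines.dropWhile (fun x => !pvMarker x)) := by
  induction lines with
  | nil => intro m c segs; simp [pvFin, pvSeg]
  | cons x xs ih =>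
    intro m c segs
    by_cases hx : pvMarker x
    · simp only [List.foldl_cons, pvStepA, hx, if_pos, List.takeWhile_cons, Bool.not_eq_true',
        List.dropWhile_cons]
      rw [ih]
      simp [pvSeg, hx]
    · simp only [List.foldl_cons, pvStepA, hx, if_neg, Bool.false_eq_true, not_false_iff,
        List.takeWhile_cons, List.dropWhile_cons]
      rw [ih]
      simp [List.append_assoc]

theorem foldA_eq_seg (lines : List String) :
    pvFin (lines.foldl pvStepA (none, [], [])) = pvSeg lines := by
  induction lines with
  | nil => simp [pvFin, pvSeg]
  | cons x xs ih =>
    by_cases hx : pvMarker x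
    · simp only [List.foldl_cons, pvStepA, hx, if_pos]
      rw [foldA_some]
      simp [pvSeg, hx]
    · simp only [List.foldl_cons, pvStepA, hx, if_neg, Bool.false_eq_true, not_false_iff]
      rw [ih]
      simp [pvSeg, hx]

theorem pvScanB_eq (lines : List String) (j : Nat) :
    pvScanB lines j = j + ((lines.drop j).takeWhile (fun x => !pvMarker x)).length := by
  fun_induction pvScanB lines j with
  | case1 j h hm =>
    rw [List.drop_eq_getElem_cons h]
    simp [hm]
  | case2 j h hm ih =>
    rw [List.drop_eq_getElem_cons h]
    simp only [List.takeWhile_cons, hm]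
    simp only [Bool.not_false, if_pos, List.length_cons] at *
    omega
  | case3 j h =>
    have : lines.drop j = [] := List.drop_eq_nil_of_le (by omega)
    simp [this]

theorem pvDropWhile_eq_drop (p : String → Bool) (l : List String) :
    l.dropWhile p = l.drop (l.takeWhile p).length := by
  induction l with
  | nil => rfl
  | cons x xs ih => by_cases h : p x <;> simp [h, ih]

theorem pvSeg_drop_pos (lines : List String) (i : Nat) (h : i < lines.length)
    (hm : pvMarker lines[i] = true) :
    pvSeg (lines.drop i) =
      (lines[i], PySem.Str.join "\n" ((lines.drop (i + 1)).takeWhile (fun x => !pvMarker x))) ::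
        pvSeg ((lines.drop (i + 1)).dropWhile (fun x => !pvMarker x)) := by
  rw [List.drop_eq_getElem_cons h]
  simp only [pvSeg]
  rw [if_pos hm]

theorem pvSeg_drop_neg (lines : List String) (i : Nat) (h : i < lines.length)
    (hm : ¬ pvMarker lines[i] = true) :
    pvSeg (lines.drop i) = pvSeg (lines.drop (i + 1)) := by
  rw [List.drop_eq_getElem_cons h]
  simp only [pvSeg]
  rw [if_neg hm]

theorem pvLoopB_eq (lines : List String) (i : Nat) (segs : List (String × String)) :
    pvLoopB lines i segs = segs ++ pvSeg (lines.drop i) := by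
  fun_induction pvLoopB lines i segs with
  | case1 i segs h hm j ih =>
    rw [ih]
    have hj : j = pvScanB lines (i + 1) := rfl
    have hsc := pvScanB_eq lines (i + 1)
    have h1 : ((i : Int) + 1) = (((i + 1 : Nat) : Int)) := by push_cast; ring
    have hslice : PySem.List.slice lines (some ((i : Int) + 1)) (some (j : Int))
        = (lines.drop (i + 1)).takeWhile (fun x => !pvMarker x) := by
      rw [h1, PySem.List.slice_natCast]
      rw [show j - (i + 1) = ((lines.drop (i + 1)).takeWhile (fun x => !pvMarker x)).length by omega]
      exact (List.prefix_iff_eq_take.mp (List.takeWhile_prefix _)).symm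
    have hdropj : lines.drop j = (lines.drop (i + 1)).dropWhile (fun x => !pvMarker x) := by
      rw [pvDropWhile_eq_drop, List.drop_drop]
      congr 1
    rw [hslice, hdropj, List.append_assoc, List.singleton_append, pvSeg_drop_pos lines i h hm]
  | case2 i segs h hm ih =>
    rw [ih, pvSeg_drop_neg lines i h hm]
  | case3 i segs h =>
    have : lines.drop i = [] := List.drop_eq_nil_of_le (by omega)
    simp [this, pvSeg]

-- ===== VERDICT (by name: the statement is the Claim_ definition above) =====
theorem split_on_external_py_spec : Claim_equal_split_on_external_py := by
  intro value _
  unfold Spec_split_on_external_py split_on_external_py split_on_external_py_alt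
  rw [pvLoopB_eq]
  simp only [List.nil_append, List.drop_zero]
  exact foldA_eq_seg ((PySem.Str.split? value "\n").getD [])
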